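-- pv_equiv track=rewrite | github.com/AmauryOrtega/scripts-simulacion | Poker.py | twop
-- ===== SOURCE A (Python) =====
-- def onep(numero):
--   # Conteo
--   guia = dict.fromkeys(numero, 0)
--   for digito in numero:
--     guia[digito]+=1
--   # Par
--   for conteo in guia.values():
--     if conteo >= 2:
--       return True
--   return False
--
-- def twop(numero):
--   # Conteo
--   guia = dict.fromkeys(numero, 0)
--   for digito in numero:
--     guia[digito]+=1
--   # Primer par
--   # Solo si sabemos que habia uno
--   if onep(numero):
--     par = None
--     for conteo in guia.items():
--       if conteo[1] >= 2:
--         par = conteo[0]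
--         break
--     # Quitamos el que habia
--     del guia[par]
--     # Segundo par
--     for conteo in guia.values():
--       if conteo >= 2:
--         return True
--     return False
--   else:
--     return False
-- ===== SOURCE B (Python) =====
-- def twop(numero):
--     # Build the digit frequencies once, then a single threshold count:
--     # two pairs <=> at least two distinct values occur at least twice.
--     counts = {}
--     for d in numero:
--         counts[d] = counts.get(d, 0) + 1
--     return sum(1 for c in counts.values() if c >= 2) >= 2
-- ===== Notes on version B (the rewrite author's own statement) =====
-- stated objective: simpler
-- what changed: A calls a separate onep pass, then re-finds the first pair in the dict items, deletes it and rescans the remaining values; B builds the counts once and returns whether at least two distinct values have count >= 2 (one threshold tally, no find/delete/rescan and no onep helper; measured faster in a timing run, constant-factor: fewer passes).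
import Mathlib
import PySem

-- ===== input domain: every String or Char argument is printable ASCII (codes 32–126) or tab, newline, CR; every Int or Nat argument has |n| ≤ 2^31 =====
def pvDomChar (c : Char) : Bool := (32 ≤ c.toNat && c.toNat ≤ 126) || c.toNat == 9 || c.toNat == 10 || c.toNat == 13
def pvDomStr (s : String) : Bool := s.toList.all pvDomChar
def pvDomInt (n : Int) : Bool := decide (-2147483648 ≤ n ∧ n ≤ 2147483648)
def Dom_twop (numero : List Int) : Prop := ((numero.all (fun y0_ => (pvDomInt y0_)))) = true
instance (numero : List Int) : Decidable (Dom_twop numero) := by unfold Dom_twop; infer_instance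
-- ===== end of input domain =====

-- B replaces A's onep pass + find-first-pair/delete/rescan with one threshold tally
-- over the counts; objective: simpler (same asymptotic cost).

-- ===== PORT A =====
-- guia = dict.fromkeys(numero, 0); for digito in numero: guia[digito] += 1
-- (this counting code appears verbatim in both onep and twop, ported once as a helper)
def pvConteo (numero : List Int) : PySem.Dict Int Int :=
  numero.foldl (fun d x => d.modify x 0 (· + 1))
    (numero.foldl (fun d x => d.insert x 0) PySem.Dict.empty)

def onep (numero : List Int) : Bool :=
  (pvConteo numero).values.any (fun conteo => decide (2 ≤ conteo))

def twop (numero : List Int) : Bool :=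
  if onep numero then
    -- par = first key whose count is >= 2 (the break loop over guia.items())
    match (pvConteo numero).items.find? (fun conteo => decide (2 ≤ conteo.2)) with
    | some par =>
        -- del guia[par]; then scan the remaining values for a second pair
        ((pvConteo numero).erase par.1).values.any (fun conteo => decide (2 ≤ conteo))
    | none => false   -- Python would do 'del guia[None]' here; unreachable when onep is true
  else false

-- ===== PORT B =====
def twop_alt (numero : List Int) : Bool :=
  decide (2 ≤ ((numero.foldl (fun d x => d.insert x (d.getD x 0 + 1))
      (PySem.Dict.empty : PySem.Dict Int Int)).values.countP (fun c => decide (2 ≤ c))))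

-- ===== PRECONDITION & SPEC =====
def Spec_twop (numero : List Int) (out : Bool) : Prop := out = twop_alt numero
instance (numero : List Int) (out : Bool) : Decidable (Spec_twop numero out) := by unfold Spec_twop; infer_instance

-- ===== CLAIM (what is proved, stated in full; the proofs are below) =====
def Claim_equal_twop : Prop := ∀ (numero : List Int), Dom_twop numero → Spec_twop numero (twop numero)

-- ===== LEMMAS AND PROOFS =====

-- the fromkeys dict has value 0 at every key
theorem pv_fromkeys_getD (l : List Int) (d : PySem.Dict Int Int)
    (h : ∀ k, d.getD k 0 = 0) (k : Int) :
    (l.foldl (fun d x => d.insert x 0) d).getD k 0 = 0 := by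
  induction l generalizing d with
  | nil => exact h k
  | cons x xs ih =>
      simp only [List.foldl_cons]
      exact ih _ (fun k' => by rw [PySem.Dict.getD_insert]; split <;> simp [h])

theorem pv_conteo_getD (numero : List Int) (k : Int) :
    (pvConteo numero).getD k 0 = numero.count k := by
  unfold pvConteo
  rw [PySem.Dict.getD_foldl_modify_add_one,
      pv_fromkeys_getD numero PySem.Dict.empty (fun k => by simp [PySem.Dict.getD_empty])]
  simp

theorem pv_set_update_of_subset (l S : List Int) (h : ∀ x ∈ l, x ∈ S) :
    PySem.Set.update S l = S := by
  induction l generalizing S with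
  | nil => rfl
  | cons x xs ih =>
      have hx : PySem.Set.add S x = S := by
        simp only [PySem.Set.add]
        rw [if_pos (by simpa using h x (by simp))]
      simp only [PySem.Set.update, List.foldl_cons, hx]
      exact ih S (fun y hy => h y (List.mem_cons_of_mem _ hy))

theorem pv_conteo_keys (numero : List Int) :
    (pvConteo numero).keys = PySem.Set.ofList numero := by
  unfold pvConteo
  rw [PySem.Dict.keys_foldl_modify, PySem.Dict.keys_foldl_insert]
  have h0 : PySem.Set.update (PySem.Dict.empty (κ := Int) (ν := Int)).keys numero
      = PySem.Set.ofList numero := rfl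
  rw [h0]
  exact pv_set_update_of_subset numero _
    (fun x hx => (PySem.Set.mem_ofList numero x).mpr hx)

theorem pv_conteo_items (numero : List Int) :
    (pvConteo numero).items
      = (PySem.Set.ofList numero).map (fun k => (k, (numero.count k : Int))) := by
  have hk := pv_conteo_keys numero
  have hnd : (pvConteo numero).keys.Nodup := by rw [hk]; exact PySem.Set.nodup_ofList numero
  rw [PySem.Dict.items_eq_map_keys _ hnd 0, hk]
  exact List.map_congr_left (fun k _ => by rw [pv_conteo_getD])

-- core list fact: after removing the first element satisfying q from a Nodup list,
-- another one remains iff the original list had at least two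
theorem pv_second_pair (S : List Int) (q : Int → Bool) (k₀ : Int)
    (hnd : S.Nodup) (hfind : S.find? q = some k₀) :
    ((S.filter (fun k => !(k == k₀))).any q) = decide (2 ≤ S.countP q) := by
  obtain ⟨hq, as, bs, rfl, has⟩ := List.find?_eq_some_iff_append.mp hfind
  have hk₀as : k₀ ∉ as := fun h => by have := has k₀ h; simp [hq] at this
  have hk₀bs : k₀ ∉ bs := by
    have h1 : (k₀ :: bs).Nodup := hnd.of_append_right
    exact (List.nodup_cons.mp h1).1
  have hfa : as.filter (fun k => !(k == k₀)) = as :=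
    List.filter_eq_self.mpr (fun a ha => by simp; rintro rfl; exact hk₀as ha)
  have hfb : bs.filter (fun k => !(k == k₀)) = bs :=
    List.filter_eq_self.mpr (fun a ha => by simp; rintro rfl; exact hk₀bs ha)
  have hcas : as.countP q = 0 := List.countP_eq_zero.mpr (fun a ha => by simpa using has a ha)
  have hanyas : as.any q = false := List.any_eq_false.mpr (fun a ha => by simpa using has a ha)
  have hfilter : (as ++ k₀ :: bs).filter (fun k => !(k == k₀)) = as ++ bs := by
    simp [List.filter_append, hfa, hfb]
  have hcnt : (as ++ k₀ :: bs).countP q = 1 + bs.countP q := by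
    simp [List.countP_append, hcas, hq]
    omega
  rw [hfilter, List.any_append, hanyas, Bool.false_or, hcnt]
  rcases h : bs.any q with _ | _
  · have hcb : bs.countP q = 0 := by
      rw [List.countP_eq_zero]
      intro a ha
      simpa using List.any_eq_false.mp h a ha
    simp [hcb]
  · obtain ⟨a, ha, hqa⟩ := List.any_eq_true.mp h
    have hpos : 0 < bs.countP q := List.countP_pos_iff.mpr ⟨a, ha, hqa⟩
    have h2 : 2 ≤ 1 + bs.countP q := by omega
    simp [h2]

theorem twop_eq_alt (numero : List Int) : twop numero = twop_alt numero := by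
  have hitems := pv_conteo_items numero
  have hnd := PySem.Set.nodup_ofList numero
  have honep : onep numero
      = (PySem.Set.ofList numero).any (fun k => decide (2 ≤ (numero.count k : Int))) := by
    unfold onep
    simp only [PySem.Dict.values, hitems, List.map_map, List.any_map]
    rfl
  have halt : twop_alt numero
      = decide (2 ≤ (PySem.Set.ofList numero).countP
          (fun k => decide (2 ≤ (numero.count k : Int)))) := by
    unfold twop_alt
    have hc : (numero.foldl (fun d x => d.insert x (d.getD x 0 + 1))
        (PySem.Dict.empty : PySem.Dict Int Int)) = PySem.Dict.counter numero :=
      PySem.Dict.foldl_insert_getD_add_one_eq_counter numero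
    rw [hc]
    simp only [PySem.Dict.values, PySem.Dict.items_counter, List.map_map, List.countP_map]
    rfl
  rw [halt]
  unfold twop
  rw [honep]
  rcases hany : (PySem.Set.ofList numero).any
      (fun k => decide (2 ≤ (numero.count k : Int))) with _ | _
  · have hz : (PySem.Set.ofList numero).countP
        (fun k => decide (2 ≤ (numero.count k : Int))) = 0 :=
      List.countP_eq_zero.mpr (fun a ha => by simpa using List.any_eq_false.mp hany a ha)
    simp only [Bool.false_eq_true, if_false, hz]
    rfl
  · obtain ⟨k₀, hk₀⟩ : ∃ k₀, (PySem.Set.ofList numero).find?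
        (fun k => decide (2 ≤ (numero.count k : Int))) = some k₀ := by
      obtain ⟨a, ha, hqa⟩ := List.any_eq_true.mp hany
      rcases hf : (PySem.Set.ofList numero).find?
          (fun k => decide (2 ≤ (numero.count k : Int))) with _ | k
      · exact absurd hqa (by simpa using List.find?_eq_none.mp hf a ha)
      · exact ⟨k, rfl⟩
    have hfind : (pvConteo numero).items.find? (fun conteo => decide (2 ≤ conteo.2))
        = some (k₀, (numero.count k₀ : Int)) := by
      rw [hitems, List.find?_map]
      have hco : ((fun conteo : Int × Int => decide (2 ≤ conteo.2))
            ∘ fun k => (k, (numero.count k : Int)))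
          = (fun k => decide (2 ≤ (numero.count k : Int))) := rfl
      rw [hco, hk₀]
      rfl
    simp only [if_true, hfind]
    simp only [PySem.Dict.erase, PySem.Dict.values, hitems, List.filter_map,
      List.map_map, List.any_map]
    have hco2 : ((fun p : Int × Int => !(p.1 == k₀)) ∘ fun k => (k, (numero.count k : Int)))
        = (fun k => !(k == k₀)) := rfl
    have hco4 : ((fun conteo : Int => decide (2 ≤ conteo)) ∘ (fun x : Int × Int => x.2)
          ∘ (fun k : Int => (k, (numero.count k : Int))))
        = (fun k : Int => decide (2 ≤ (numero.count k : Int))) := rfl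
    rw [hco2, hco4]
    exact pv_second_pair (PySem.Set.ofList numero)
      (fun k => decide (2 ≤ (numero.count k : Int))) k₀ hnd hk₀

-- ===== VERDICT (by name: the statement is the Claim_ definition above) =====
theorem twop_spec : Claim_equal_twop := by
  intro numero _
  unfold Spec_twop
  exact twop_eq_alt numero
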